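-- pv_equiv track=rewrite | github.com/wenbo222/website-projects | major-projects/aes-encryption/AES-CFB.py | shift_rows_inv
-- ===== SOURCE A (Python) =====
-- def shift_rows_inv(block):
--     """
--     shift_rows_inv(list) -> list
--
--     Shifts the second row right 1.
--     Shifts the third row right 2.
--     Shifts the fourth row right 3.
--     Returns the modified list.
--     """
--
--     # Initializations
--     temp=[]
--     temp1=[]
--     temp2=[]
--     temp3=[]
--     temp4=[]
--
--     # Append according to patterns
--     for i in range(4):
--         temp1.append(block[0][i])
--     temp2.append(block[1][3])
--     for i in range(3):
--         temp2.append(block[1][i])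
--     temp3.append(block[2][2])
--     temp3.append(block[2][3])
--     for i in range(2):
--         temp3.append(block[2][i])
--     for i in range(1, 4):
--         temp4.append(block[3][i])
--     temp4.append(block[3][0])
--     temp.append(temp1)
--     temp.append(temp2)
--     temp.append(temp3)
--     temp.append(temp4)
--
--     return temp
-- ===== SOURCE B (Python) =====
-- def shift_rows_inv(block):
--     out = []
--     for r in range(4):
--         row = [block[r][c] for c in range(4)]
--         for _ in range(r):
--             row = [row[-1]] + row[:-1]
--         out.append(row)
--     return out
-- ===== Notes on version B (the rewrite author's own statement) =====
-- stated objective: alternative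
-- what changed: Instead of five temp lists with hand-unrolled appends placing each element at its final position, B gathers each row's four cells and then applies an elementary rotate-right-by-one step r times to row r inside one uniform loop.
import Mathlib
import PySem

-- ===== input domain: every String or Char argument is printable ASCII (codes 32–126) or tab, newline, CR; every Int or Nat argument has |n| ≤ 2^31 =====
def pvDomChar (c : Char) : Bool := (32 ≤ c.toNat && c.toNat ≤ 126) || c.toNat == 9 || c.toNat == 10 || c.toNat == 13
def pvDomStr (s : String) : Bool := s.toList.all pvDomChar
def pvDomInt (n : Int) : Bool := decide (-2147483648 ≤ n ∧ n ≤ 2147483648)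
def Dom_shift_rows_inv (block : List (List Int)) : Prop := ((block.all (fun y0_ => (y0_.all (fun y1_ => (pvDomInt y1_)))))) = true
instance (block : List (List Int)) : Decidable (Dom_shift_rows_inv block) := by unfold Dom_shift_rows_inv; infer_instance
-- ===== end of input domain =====

-- B reads the 4x4 cells and builds each output row by applying an elementary
-- rotate-right-by-one step r times, instead of A's five temp lists with unrolled appends.

-- block[r][c] (in-range under Pre_, so the defaults are never used)
def pvCell (block : List (List Int)) (r c : Int) : Int :=
  PySem.List.pyGetD (PySem.List.pyGetD block r []) c 0

-- ===== PORT A =====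
def shift_rows_inv (block : List (List Int)) : List (List Int) :=
  let temp : List (List Int) := []
  let temp1 : List Int := []
  let temp2 : List Int := []
  let temp3 : List Int := []
  let temp4 : List Int := []
  let temp1 := (PySem.List.pyRange 0 4 1).foldl (fun acc i => acc ++ [pvCell block 0 i]) temp1
  let temp2 := temp2 ++ [pvCell block 1 3]
  let temp2 := (PySem.List.pyRange 0 3 1).foldl (fun acc i => acc ++ [pvCell block 1 i]) temp2
  let temp3 := temp3 ++ [pvCell block 2 2]
  let temp3 := temp3 ++ [pvCell block 2 3]
  let temp3 := (PySem.List.pyRange 0 2 1).foldl (fun acc i => acc ++ [pvCell block 2 i]) temp3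
  let temp4 := (PySem.List.pyRange 1 4 1).foldl (fun acc i => acc ++ [pvCell block 3 i]) temp4
  let temp4 := temp4 ++ [pvCell block 3 0]
  let temp := temp ++ [temp1]
  let temp := temp ++ [temp2]
  let temp := temp ++ [temp3]
  let temp := temp ++ [temp4]
  temp

-- ===== PORT B =====
-- one elementary rotation: [row[-1]] + row[:-1]
def pvRotOnce (row : List Int) : List Int :=
  [PySem.List.pyGetD row (-1) 0] ++ PySem.List.slice row none (some (-1))

def shift_rows_inv_alt (block : List (List Int)) : List (List Int) :=
  (PySem.List.pyRange 0 4 1).foldl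
    (fun out r =>
      let row := (PySem.List.pyRange 0 4 1).map (fun c => pvCell block r c)
      let row := (PySem.List.pyRange 0 r 1).foldl (fun row _ => pvRotOnce row) row
      out ++ [row]) []

-- ===== PRECONDITION & SPEC =====
-- A raises IndexError unless there are at least 4 rows and each of the first 4 rows has at least 4 entries.
def Pre_shift_rows_inv (block : List (List Int)) : Prop :=
  4 ≤ block.length ∧ ∀ row ∈ block.take 4, 4 ≤ row.length
instance (block : List (List Int)) : Decidable (Pre_shift_rows_inv block) := by
  unfold Pre_shift_rows_inv; infer_instance
def pvWitness_shift_rows_inv : List (List Int) :=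
  [[1, 2, 3, 4], [5, 6, 7, 8], [9, 10, 11, 12], [13, 14, 15, 16]]
def Spec_shift_rows_inv (block : List (List Int)) (out : List (List Int)) : Prop := out = shift_rows_inv_alt block
instance (block : List (List Int)) (out : List (List Int)) : Decidable (Spec_shift_rows_inv block out) := by unfold Spec_shift_rows_inv; infer_instance

-- ===== CLAIM (what is proved, stated in full; the proofs are below) =====
def Claim_equal_shift_rows_inv : Prop := ∀ (block : List (List Int)), Dom_shift_rows_inv block → Pre_shift_rows_inv block → Spec_shift_rows_inv block (shift_rows_inv block)

-- ===== LEMMAS AND PROOFS =====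
theorem pvLe0 (n : Nat) : (0:Int) ≤ (n:Int) + 1 + 1 + 1 := by positivity
theorem pvLe0' (n : Nat) : (0:Int) ≤ (n:Int) + 1 + 1 := by positivity
theorem pvLe2 (n : Nat) : (2:Int) ≤ (n:Int) + 1 + 1 + 1 := by omega
theorem pvLe3 (n : Nat) : (3:Int) ≤ (n:Int) + 1 + 1 + 1 := by omega

-- ===== VERDICT (by name: the statement is the Claim_ definition above) =====
theorem shift_rows_inv_spec : Claim_equal_shift_rows_inv := by
  intro block hdom hpre
  obtain ⟨hlen, hrows⟩ := hpre
  match block, hlen with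
  | a :: b :: c :: d :: rest, _ =>
    have ha : 4 ≤ a.length := hrows a (by simp)
    have hb : 4 ≤ b.length := hrows b (by simp)
    have hc : 4 ≤ c.length := hrows c (by simp)
    have hd : 4 ≤ d.length := hrows d (by simp)
    match a, ha with
    | a0 :: a1 :: a2 :: a3 :: ar, _ =>
    match b, hb with
    | b0 :: b1 :: b2 :: b3 :: br, _ =>
    match c, hc with
    | c0 :: c1 :: c2 :: c3 :: cr, _ =>
    match d, hd with
    | d0 :: d1 :: d2 :: d3 :: dr, _ =>
      unfold Spec_shift_rows_inv shift_rows_inv shift_rows_inv_alt pvRotOnce pvCell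
      simp [PySem.List.pyRange, PySem.List.slice, PySem.List.clampIdx, PySem.List.pyGetD, PySem.List.pyGet?,
            PySem.List.pyIdx?, List.range_succ, pvLe0, pvLe0', pvLe2, pvLe3]
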